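-- pv_equiv track=rewrite | github.com/manodyaNrathnyaka/Deterministic_finite_automaton | transition.py | validate_nic
-- ===== SOURCE A (Python) =====
-- def validate_nic(nic):
--     state = 0
--
--     for ch in nic:
--         if state < 9 and ch.isdigit():
--             state += 1
--
--         elif state == 9:
--             if ch in ['V', 'X']:
--                 return "ACCEPT (Valid Old NIC)"
--             elif ch.isdigit():
--                 state += 1
--             else:
--                 return "REJECT"
--
--         elif 10 <= state < 11 and ch.isdigit():
--             state += 1
--
--         elif state == 11 and ch.isdigit():
--             state += 1
--
--         else:
--             return "REJECT"
--
--
--     if state == 12: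
--         return "ACCEPT (Valid New NIC)"
--
--     return "REJECT"
-- ===== SOURCE B (Python) =====
-- def validate_nic(nic):
--     if len(nic) >= 10 and nic[:9].isdigit() and nic[9] in ('V', 'X'):
--         return "ACCEPT (Valid Old NIC)"
--     if len(nic) == 12 and nic.isdigit():
--         return "ACCEPT (Valid New NIC)"
--     return "REJECT"
-- ===== Notes on version B (the rewrite author's own statement) =====
-- stated objective: simpler
-- what changed: Replaced the character-by-character DFA loop with a state counter and early returns by three direct structural checks: old NIC iff len>=10 with a 9-digit prefix and 'V'/'X' at index 9, new NIC iff a 12-character all-digit string, else REJECT.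
import Mathlib
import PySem

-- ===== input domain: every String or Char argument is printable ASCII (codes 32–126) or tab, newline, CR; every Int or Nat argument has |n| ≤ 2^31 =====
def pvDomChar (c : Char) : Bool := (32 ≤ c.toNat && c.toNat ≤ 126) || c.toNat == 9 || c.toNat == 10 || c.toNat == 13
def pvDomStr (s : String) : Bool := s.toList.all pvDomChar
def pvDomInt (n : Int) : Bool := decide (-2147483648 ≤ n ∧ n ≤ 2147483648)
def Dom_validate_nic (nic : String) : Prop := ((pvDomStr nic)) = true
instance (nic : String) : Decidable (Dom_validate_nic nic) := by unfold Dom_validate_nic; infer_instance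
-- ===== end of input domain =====

-- B replaces A's state-machine loop by three direct structural checks (length, digit prefix,
-- 'V'/'X' at index 9, all-digit length 12); objective: simpler. Return values only; no mutation.

-- ===== PORT A =====
-- the DFA loop of A: state counts consumed digits, early returns transliterated
def validateNicLoop : List Char → Int → String
  | [], state => if state = 12 then "ACCEPT (Valid New NIC)" else "REJECT"
  | ch :: rest, state =>
    if state < 9 ∧ PySem.Chars.strIsdigit [ch] = true then
      validateNicLoop rest (state + 1)
    else if state = 9 then
      if ch = 'V' ∨ ch = 'X' then "ACCEPT (Valid Old NIC)"
      else if PySem.Chars.strIsdigit [ch] = true then validateNicLoop rest (state + 1)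
      else "REJECT"
    else if (10 ≤ state ∧ state < 11) ∧ PySem.Chars.strIsdigit [ch] = true then
      validateNicLoop rest (state + 1)
    else if state = 11 ∧ PySem.Chars.strIsdigit [ch] = true then
      validateNicLoop rest (state + 1)
    else "REJECT"

def validate_nic (nic : String) : String := validateNicLoop nic.toList 0

-- ===== PORT B =====
def validate_nic_alt (nic : String) : String :=
  let cs := nic.toList
  if cs.length ≥ 10 ∧ PySem.Chars.strIsdigit (PySem.List.slice cs none (some 9)) = true ∧
      (PySem.List.pyGet? cs 9 = some 'V' ∨ PySem.List.pyGet? cs 9 = some 'X') then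
    "ACCEPT (Valid Old NIC)"
  else if cs.length = 12 ∧ PySem.Chars.strIsdigit cs = true then
    "ACCEPT (Valid New NIC)"
  else "REJECT"

-- ===== PRECONDITION & SPEC =====
def Spec_validate_nic (nic : String) (out : String) : Prop := out = validate_nic_alt nic
instance (nic : String) (out : String) : Decidable (Spec_validate_nic nic out) := by unfold Spec_validate_nic; infer_instance

-- ===== CLAIM (what is proved, stated in full; the proofs are below) =====
def Claim_equal_validate_nic : Prop := ∀ (nic : String), Dom_validate_nic nic → Spec_validate_nic nic (validate_nic nic)

-- ===== LEMMAS AND PROOFS =====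

-- closed form of A's loop for an arbitrary state 0 ≤ s ≤ 12
def loopSpec (cs : List Char) (s : Int) : String :=
  if s ≤ 9 ∧ (9 - s).toNat < cs.length ∧ (cs.take (9 - s).toNat).all PySem.Chars.isdigit = true ∧
      (cs[(9 - s).toNat]? = some 'V' ∨ cs[(9 - s).toNat]? = some 'X') then
    "ACCEPT (Valid Old NIC)"
  else if s + cs.length = 12 ∧ cs.all PySem.Chars.isdigit = true then
    "ACCEPT (Valid New NIC)"
  else "REJECT"

theorem strIsdigit_singleton (c : Char) :
    PySem.Chars.strIsdigit [c] = PySem.Chars.isdigit c := by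
  simp [PySem.Chars.strIsdigit]

theorem isdigit_ne_V {c : Char} (h : PySem.Chars.isdigit c = true) : c ≠ 'V' := by
  intro hc; subst hc; simp [PySem.Chars.isdigit] at h

theorem isdigit_ne_X {c : Char} (h : PySem.Chars.isdigit c = true) : c ≠ 'X' := by
  intro hc; subst hc; simp [PySem.Chars.isdigit] at h

theorem loop_eq_spec (cs : List Char) : ∀ s : Int, 0 ≤ s → s ≤ 12 →
    validateNicLoop cs s = loopSpec cs s := by
  induction cs with
  | nil =>
    intro s h0 h12
    simp only [validateNicLoop, loopSpec, List.length_nil, List.take_nil, List.all_nil,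
      List.getElem?_nil, Nat.cast_zero, add_zero, Nat.not_lt_zero, false_and, and_false,
      if_false, and_true]
  | cons ch rest ih =>
    intro s h0 h12
    simp only [validateNicLoop, strIsdigit_singleton]
    by_cases hd : PySem.Chars.isdigit ch = true
    · -- ch is a digit (hence not 'V'/'X')
      have hV := isdigit_ne_V hd
      have hX := isdigit_ne_X hd
      have hnvx : ¬ (ch = 'V' ∨ ch = 'X') := by rintro (h | h); exacts [hV h, hX h]
      simp only [hd, and_true, if_true]
      by_cases hs9 : s < 9
      · -- state < 9: consume a digit
        rw [if_pos hs9, ih (s + 1) (by omega) (by omega)]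
        unfold loopSpec
        have hk : (9 - s).toNat = (9 - (s + 1)).toNat + 1 := by omega
        simp only [hk, List.take_succ_cons, List.all_cons, hd, Bool.true_and,
          List.length_cons, List.getElem?_cons_succ, Nat.cast_add, Nat.cast_one,
          Nat.add_lt_add_iff_right]
        simp only [show (s + 1 ≤ 9) = (s ≤ 9) from propext (by omega),
          show (s + 1 + (rest.length : Int) = 12) = (s + ((rest.length : Int) + 1) = 12) from
            propext (by omega)]
      · rw [if_neg hs9]
        by_cases hs : s = 9
        · -- state 9, a digit: move to the new-NIC track
          subst hs
          rw [if_pos rfl, if_neg hnvx, ih (9 + 1) (by omega) (by omega)]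
          unfold loopSpec
          simp only [show ((9 : Int) - 9).toNat = 0 from rfl, List.take_zero, List.all_nil,
            List.getElem?_cons_zero, Option.some.injEq, List.length_cons, List.all_cons, hd,
            Bool.true_and, Nat.cast_add, Nat.cast_one, le_refl, Nat.zero_lt_succ, true_and]
          simp only [show ((9 : Int) + 1 ≤ 9) = False from eq_false (by omega),
            show (ch = 'V' ∨ ch = 'X') = False from eq_false hnvx]
          simp only [false_and, if_false]
          simp only [show ((9 : Int) + 1 + (rest.length : Int) = 12) =
              ((9 : Int) + ((rest.length : Int) + 1) = 12) from propext (by omega)]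
        · -- state 10, 11 or 12, a digit
          rw [if_neg hs]
          have hstep : 10 ≤ s → s ≤ 11 → loopSpec rest (s + 1) = loopSpec (ch :: rest) s := by
            intro h10 h11
            unfold loopSpec
            simp only [List.length_cons, List.all_cons, hd, Bool.true_and,
              Nat.cast_add, Nat.cast_one]
            simp only [show (s + 1 ≤ 9) = False from eq_false (by omega),
              show (s ≤ 9) = False from eq_false (by omega)]
            simp only [false_and, if_false]
            simp only [show (s + 1 + (rest.length : Int) = 12) =
                (s + ((rest.length : Int) + 1) = 12) from propext (by omega)]
          by_cases h1011 : 10 ≤ s ∧ s < 11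
          · rw [if_pos h1011, ih (s + 1) (by omega) (by omega)]
            exact hstep h1011.1 (by omega)
          · rw [if_neg h1011]
            by_cases h11 : s = 11
            · rw [if_pos h11, ih (s + 1) (by omega) (by omega)]
              exact hstep (by omega) (by omega)
            · -- state 12 with input left: REJECT
              rw [if_neg h11]
              unfold loopSpec
              simp only [show (s ≤ 9) = False from eq_false (by omega)]
              simp only [false_and, if_false, List.length_cons, List.all_cons, hd,
                Bool.true_and, Nat.cast_add, Nat.cast_one]
              simp only [show (s + ((rest.length : Int) + 1) = 12) = False from eq_false (by omega)]
              simp only [false_and, if_false]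
    · -- ch is not a digit
      simp only [hd, Bool.false_eq_true, and_false, if_false]
      by_cases hs : s = 9
      · subst hs
        rw [if_pos rfl]
        by_cases hvx : ch = 'V' ∨ ch = 'X'
        · rw [if_pos hvx]
          unfold loopSpec
          rw [if_pos ⟨by omega, by
              simp only [show ((9 : Int) - 9).toNat = 0 from rfl, List.length_cons]; omega, by
              simp only [show ((9 : Int) - 9).toNat = 0 from rfl, List.take_zero, List.all_nil], by
              simp only [show ((9 : Int) - 9).toNat = 0 from rfl]
              simpa using hvx⟩]
        · rw [if_neg hvx]
          unfold loopSpec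
          simp only [show ((9 : Int) - 9).toNat = 0 from rfl, List.take_zero, List.all_nil,
            List.getElem?_cons_zero, Option.some.injEq, List.length_cons, le_refl,
            Nat.zero_lt_succ, true_and]
          simp only [show (ch = 'V' ∨ ch = 'X') = False from eq_false hvx]
          simp only [if_false, List.all_cons, hd, Bool.false_and, Bool.false_eq_true,
            and_false]
      · -- not a digit, state ≠ 9: REJECT on the spot
        rw [if_neg hs]
        unfold loopSpec
        by_cases hlt : s < 9
        · have hk : (9 - s).toNat = (8 - s).toNat + 1 := by omega
          simp only [hk, List.take_succ_cons, List.all_cons, hd, Bool.false_and,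
            Bool.false_eq_true, false_and, and_false, if_false]
        · simp only [show (s ≤ 9) = False from eq_false (by omega)]
          simp only [false_and, if_false, List.all_cons, hd, Bool.false_and,
            Bool.false_eq_true, and_false]

theorem take_nonempty_isEmpty (cs : List Char) (h : 9 < cs.length) :
    (cs.take 9).isEmpty = false := by
  rw [List.isEmpty_eq_false_iff]
  intro hnil
  have hlen : (cs.take 9).length = 0 := by rw [hnil]; rfl
  rw [List.length_take] at hlen
  omega

-- ===== VERDICT (by name: the statement is the Claim_ definition above) =====
theorem validate_nic_spec : Claim_equal_validate_nic := by
  unfold Claim_equal_validate_nic Spec_validate_nic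
  intro nic _
  unfold validate_nic
  rw [loop_eq_spec nic.toList 0 (by omega) (by omega)]
  unfold loopSpec validate_nic_alt
  have hsl : PySem.List.slice nic.toList none (some 9) = nic.toList.take 9 := by
    simpa using PySem.List.slice_to_natCast (xs := nic.toList) (b := 9)
  have hget : PySem.List.pyGet? nic.toList 9 = nic.toList[9]? := by
    simpa using PySem.List.pyGet?_natCast (xs := nic.toList) (n := 9)
  simp only [hsl, hget, PySem.Chars.strIsdigit, show ((9 : Int) - 0).toNat = 9 from rfl,
    zero_add]
  by_cases hlen : 9 < nic.toList.length
  · have hne : nic.toList.isEmpty = false := by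
      rw [List.isEmpty_eq_false_iff]
      exact List.ne_nil_of_length_pos (by omega)
    simp only [take_nonempty_isEmpty nic.toList hlen, hne, Bool.not_false, Bool.true_and,
      show ((0 : Int) ≤ 9) = True from eq_true (by norm_num), true_and]
    simp only [show (nic.toList.length ≥ 10) = (9 < nic.toList.length) from propext (by omega),
      show ((nic.toList.length : Int) = 12) = (nic.toList.length = 12) from propext (by omega)]
  · simp only [show (9 < nic.toList.length) = False from eq_false hlen,
      show (nic.toList.length ≥ 10) = False from eq_false (by omega),
      show ((nic.toList.length : Int) = 12) = False from eq_false (by omega),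
      show (nic.toList.length = 12) = False from eq_false (by omega)]
    simp only [false_and, and_false, if_false]
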